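-- pv_equiv track=rewrite | github.com/readerbench/conversational-agent | pepper/components/syntactic_featurizer_sparse.py | _build_feature_to_index_map
-- ===== SOURCE A (Python) =====
-- from collections import OrderedDict
-- from typing import Any, Dict, Text, List, Tuple, Callable, Set, Optional, Type, Union
--
-- def _build_feature_to_index_map(
--         feature_vocabulary: Dict[Tuple[int, Text], Set[Text]]
-- ) -> Dict[Tuple[int, Text], Dict[Text, int]]:
--     """Creates a nested dictionary for mapping raw features to indices.
--
--     Args:
--       feature_vocabulary: a mapping from tuples of positions (in the window) and
--         supported feature names to the set of possible feature values
--     Returns: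
--        a nested mapping that maps from tuples of positions (in the window) and
--        supported feature names to "raw feature to index" mappings, i.e.
--        mappings that map the respective raw feature values to unique indices
--        (where `unique` means unique with respect to all indices in the
--        *nested* mapping)
--     """
--     # Note that this will only sort the top level keys - and we keep
--     # doing it to ensure consistently with what was done before)
--     ordered_feature_vocabulary: OrderedDict[Tuple[int, Text], Set[Text]] = \
--         OrderedDict(sorted(feature_vocabulary.items()))
--
--     # create the nested mapping
--     feature_to_idx_dict: Dict[Tuple[int, Text], Dict[Text, int]] = {}
--     offset = 0
--     for (
--             position_and_feature_name,
--             feature_values,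
--     ) in ordered_feature_vocabulary.items():
--         sorted_feature_values = sorted(feature_values)
--         feature_to_idx_dict[position_and_feature_name] = {
--             feature_value: feature_idx
--             for feature_idx, feature_value in enumerate(
--                 sorted_feature_values, start=offset
--             )
--         }
--         offset += len(feature_values)
--
--     return feature_to_idx_dict
-- ===== SOURCE B (Python) =====
-- def _build_feature_to_index_map(feature_vocabulary):
--     # Rank-based indexing: the unique index of a value is computed directly as
--     # its rank in the global (key, value) order -- the number of values living
--     # under strictly smaller keys plus the number of same-key values that
--     # compare smaller -- instead of threading a running offset / enumerate.
--     sizes = {key: len(values) for key, values in feature_vocabulary.items()}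
--     result = {}
--     for key, values in sorted(feature_vocabulary.items()):
--         base = sum(count for k, count in sizes.items() if k < key)
--         result[key] = {
--             value: base + sum(1 for w in values if w < value)
--             for value in sorted(values)
--         }
--     return result
-- ===== Notes on version B (the rewrite author's own statement) =====
-- stated objective: alternative
-- what changed: Replaces A's stateful running-offset + enumerate(start=offset) index assignment by stateless rank counting: each value's index is computed directly as (total number of values under strictly smaller keys) + (number of same-key values that compare smaller).
import Mathlib
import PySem

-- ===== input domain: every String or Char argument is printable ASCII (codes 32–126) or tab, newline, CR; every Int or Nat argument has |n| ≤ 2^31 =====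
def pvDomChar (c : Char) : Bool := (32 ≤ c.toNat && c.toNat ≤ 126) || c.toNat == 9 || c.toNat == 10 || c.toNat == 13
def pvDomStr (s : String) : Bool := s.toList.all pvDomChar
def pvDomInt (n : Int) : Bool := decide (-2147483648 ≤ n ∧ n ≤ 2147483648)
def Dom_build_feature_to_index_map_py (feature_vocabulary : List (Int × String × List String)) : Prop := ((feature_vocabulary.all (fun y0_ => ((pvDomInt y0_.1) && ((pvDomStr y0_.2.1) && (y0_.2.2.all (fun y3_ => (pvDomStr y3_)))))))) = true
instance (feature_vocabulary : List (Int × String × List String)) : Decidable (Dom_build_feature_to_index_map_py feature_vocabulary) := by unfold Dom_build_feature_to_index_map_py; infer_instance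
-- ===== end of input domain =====

-- B assigns each index directly as a rank (values under smaller keys + smaller same-key values) instead of A's running offset + enumerate (alternative decomposition, same result).


-- ===== PORT A =====
-- sorted(feature_vocabulary.items()): under Pre_ the (position, name) keys are
-- distinct, so Python never compares the third (set) components and sorting the
-- items equals sorting by the key pair; each dict insert is at a fresh key, so
-- it appends, and the inner dict comprehension over the Nodup sorted values is
-- its pair list in order.
def build_feature_to_index_map_py (feature_vocabulary : List (Int × String × List String)) : List (Int × String × List (String × Int)) :=
  let ordered := PySem.List.sorted2 feature_vocabulary (fun t => t.1) (fun t => t.2.1) false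
  (ordered.foldl
    (fun (st : List (Int × String × List (String × Int)) × Int) t =>
      let sorted_feature_values := PySem.List.sorted t.2.2 (fun v => v) false
      (st.1 ++ [(t.1, t.2.1,
          (PySem.List.enumerate sorted_feature_values st.2).map (fun p => (p.2, p.1)))],
       st.2 + PySem.List.len t.2.2))
    ([], 0)).1

-- ===== PORT B =====
-- Python's '<' on the (int, str) key tuples, lexicographic (String '<' is
-- exactly Python's str '<').
def pvKeyLt (a b : Int × String) : Bool :=
  decide (a.1 < b.1) || (a.1 == b.1 && decide (a.2 < b.2))

-- sizes = {key: len(values) ...} with the keys distinct under Pre_ is its pair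
-- list; sorted(feature_vocabulary.items()) again only compares the key pairs;
-- each result[key] insert is at a fresh key, so it appends.
def build_feature_to_index_map_py_alt (feature_vocabulary : List (Int × String × List String)) : List (Int × String × List (String × Int)) :=
  let sizes := feature_vocabulary.map (fun t => ((t.1, t.2.1), PySem.List.len t.2.2))
  (PySem.List.sorted2 feature_vocabulary (fun t => t.1) (fun t => t.2.1) false).foldl
    (fun res t =>
      let base := ((sizes.filter (fun p => pvKeyLt p.1 (t.1, t.2.1))).map (fun p => p.2)).sum
      res ++ [(t.1, t.2.1,
        (PySem.List.sorted t.2.2 (fun v => v) false).map (fun v =>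
          (v, base + (t.2.2.countP (fun w => decide (w < v)) : Int))))])
    []

-- ===== PRECONDITION & SPEC =====
-- Pre_ only requires the list to be a faithful encoding of A's argument type
-- Dict[Tuple[int, str], Set[str]]: the (position, name) keys pairwise distinct
-- (dict keys are unique) and each value list without duplicates (it encodes a
-- set); no actual Python input is excluded.
def Pre_build_feature_to_index_map_py (feature_vocabulary : List (Int × String × List String)) : Prop :=
  (feature_vocabulary.map (fun t => (t.1, t.2.1))).Nodup ∧
  ∀ t ∈ feature_vocabulary, t.2.2.Nodup
instance (feature_vocabulary : List (Int × String × List String)) : Decidable (Pre_build_feature_to_index_map_py feature_vocabulary) := by unfold Pre_build_feature_to_index_map_py; infer_instance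

def pvWitness_build_feature_to_index_map_py : (List (Int × String × List String)) :=
  [(1, "pos", ["b", "a"]), (0, "pos", []), (0, "dep", ["x"])]

def Spec_build_feature_to_index_map_py (feature_vocabulary : List (Int × String × List String)) (out : List (Int × String × List (String × Int))) : Prop := out = build_feature_to_index_map_py_alt feature_vocabulary
instance (feature_vocabulary : List (Int × String × List String)) (out : List (Int × String × List (String × Int))) : Decidable (Spec_build_feature_to_index_map_py feature_vocabulary out) := by unfold Spec_build_feature_to_index_map_py; infer_instance

-- ===== CLAIM (what is proved, stated in full; the proofs are below) =====
def Claim_equal_build_feature_to_index_map_py : Prop := ∀ (feature_vocabulary : List (Int × String × List String)), Dom_build_feature_to_index_map_py feature_vocabulary → Pre_build_feature_to_index_map_py feature_vocabulary → Spec_build_feature_to_index_map_py feature_vocabulary (build_feature_to_index_map_py feature_vocabulary)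

-- ===== LEMMAS AND PROOFS =====

-- the key of an item, and the lexicographic key orders as Props
def pvKeyOf (t : Int × String × List String) : Int × String := (t.1, t.2.1)
def pvLeK (a b : Int × String) : Prop := a.1 < b.1 ∨ (a.1 = b.1 ∧ a.2 ≤ b.2)
def pvLtK (a b : Int × String) : Prop := a.1 < b.1 ∨ (a.1 = b.1 ∧ a.2 < b.2)

lemma pvKeyLt_iff (a b : Int × String) : pvKeyLt a b = true ↔ pvLtK a b := by
  simp [pvKeyLt, pvLtK]

lemma pvLtK_irrefl (a : Int × String) : ¬ pvLtK a a := by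
  rintro (h | ⟨-, h⟩) <;> exact lt_irrefl _ h

lemma pvLtK_asymm {a b : Int × String} (h : pvLtK a b) : ¬ pvLtK b a := by
  rintro (h' | ⟨he', h'⟩) <;> rcases h with h | ⟨he, h⟩
  · omega
  · omega
  · omega
  · exact lt_asymm h h'

lemma pvLeK_trans {a b c : Int × String} (h1 : pvLeK a b) (h2 : pvLeK b c) : pvLeK a c := by
  rcases h1 with h1 | ⟨e1, h1⟩ <;> rcases h2 with h2 | ⟨e2, h2⟩
  · exact Or.inl (h1.trans h2)
  · exact Or.inl (by omega)
  · exact Or.inl (by omega)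
  · exact Or.inr ⟨by omega, h1.trans h2⟩

lemma pvLtK_of_pvLeK_of_ne {a b : Int × String} (h : pvLeK a b) (hne : a ≠ b) : pvLtK a b := by
  rcases h with h | ⟨he, h⟩
  · exact Or.inl h
  · refine Or.inr ⟨he, lt_of_le_of_ne h ?_⟩
    intro h2
    exact hne (Prod.ext he h2)

-- the comparator sorted2 uses, related to pvLeK
lemma pv_cmp_true {x y : Int × String × List String}
    (h : (decide (x.1 < y.1) || (!decide (y.1 < x.1) && decide (x.2.1 < y.2.1))) = true) :
    pvLeK (pvKeyOf x) (pvKeyOf y) := by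
  simp only [Bool.or_eq_true, Bool.and_eq_true, Bool.not_eq_true', decide_eq_true_eq,
    decide_eq_false_iff_not] at h
  rcases h with h | ⟨h1, h2⟩
  · exact Or.inl h
  · rcases lt_or_eq_of_le (not_lt.mp h1 : x.1 ≤ y.1) with h | h
    · exact Or.inl h
    · exact Or.inr ⟨h, le_of_lt h2⟩

lemma pv_cmp_false {x y : Int × String × List String}
    (h : (decide (x.1 < y.1) || (!decide (y.1 < x.1) && decide (x.2.1 < y.2.1))) = false) :
    pvLeK (pvKeyOf y) (pvKeyOf x) := by
  simp only [Bool.or_eq_false_iff, Bool.and_eq_false_iff, Bool.not_eq_false',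
    decide_eq_true_eq, decide_eq_false_iff_not] at h
  obtain ⟨h1, h2⟩ := h
  rcases h2 with h2 | h2
  · exact Or.inl h2
  · rcases lt_or_eq_of_le (not_lt.mp h1 : y.1 ≤ x.1) with h | h
    · exact Or.inl h
    · exact Or.inr ⟨h, not_lt.mp h2⟩

-- ordered insert keeps the list pvLeK-sorted
lemma pv_insertBy_pairwise (x : Int × String × List String) :
    ∀ (ys : List (Int × String × List String)),
      ys.Pairwise (fun a b => pvLeK (pvKeyOf a) (pvKeyOf b)) →
      (PySem.List.insertBy
        (fun a b => decide (a.1 < b.1) || (!decide (b.1 < a.1) && decide (a.2.1 < b.2.1))) x ys).Pairwise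
        (fun a b => pvLeK (pvKeyOf a) (pvKeyOf b)) := by
  intro ys h
  induction ys with
  | nil => simp [PySem.List.insertBy]
  | cons y ys ih =>
    rw [List.pairwise_cons] at h
    by_cases hc : (decide (x.1 < y.1) || (!decide (y.1 < x.1) && decide (x.2.1 < y.2.1))) = true
    · simp only [PySem.List.insertBy, hc, if_true]
      refine List.Pairwise.cons ?_ (List.Pairwise.cons h.1 h.2)
      intro z hz
      rcases List.mem_cons.mp hz with rfl | hz
      · exact pv_cmp_true hc
      · exact pvLeK_trans (pv_cmp_true hc) (h.1 z hz)
    · simp only [PySem.List.insertBy, hc]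
      refine List.Pairwise.cons ?_ (ih h.2)
      intro z hz
      rcases (PySem.List.insertBy_mem_iff _ _ _ _).mp hz with rfl | hz
      · exact pv_cmp_false (Bool.not_eq_true _ ▸ eq_false_of_ne_true hc)
      · exact h.1 z hz

-- sorted2 output is pvLeK-sorted on the keys
lemma pv_sorted2_pairwise (fv : List (Int × String × List String)) :
    (PySem.List.sorted2 fv (fun t => t.1) (fun t => t.2.1) false).Pairwise
      (fun a b => pvLeK (pvKeyOf a) (pvKeyOf b)) := by
  show (fv.foldl (fun acc x => PySem.List.insertBy
      (fun a b => decide (a.1 < b.1) || (!decide (b.1 < a.1) && decide (a.2.1 < b.2.1))) x acc) []).Pairwise _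
  have : ∀ (l : List (Int × String × List String)) (acc : List (Int × String × List String)),
      acc.Pairwise (fun a b => pvLeK (pvKeyOf a) (pvKeyOf b)) →
      (l.foldl (fun acc x => PySem.List.insertBy
        (fun a b => decide (a.1 < b.1) || (!decide (b.1 < a.1) && decide (a.2.1 < b.2.1))) x acc) acc).Pairwise
        (fun a b => pvLeK (pvKeyOf a) (pvKeyOf b)) := by
    intro l
    induction l with
    | nil => intro acc h; exact h
    | cons x l ih => intro acc h; exact ih _ (pv_insertBy_pairwise x acc h)
  exact this fv [] (List.Pairwise.nil)

-- rank = position: in a strictly increasing list, pairing each element with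
-- offset + (number of smaller elements) is exactly enumerate-with-swap
lemma pv_rank_enum : ∀ (s : List String) (off : Int), s.Pairwise (· < ·) →
    s.map (fun v => (v, off + (s.countP (fun w => decide (w < v)) : Int)))
      = (PySem.List.enumerate s off).map (fun p => (p.2, p.1)) := by
  intro s
  induction s with
  | nil => intro off _; rfl
  | cons h t ih =>
    intro off hp
    rw [List.pairwise_cons] at hp
    have hh : (h :: t).countP (fun w => decide (w < h)) = 0 := by
      rw [List.countP_eq_zero]
      intro w hw
      rcases List.mem_cons.mp hw with rfl | hw
      · simp
      · simp [not_lt.mpr (le_of_lt (hp.1 w hw))]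
    have ht : ∀ v ∈ t, (h :: t).countP (fun w => decide (w < v)) = t.countP (fun w => decide (w < v)) + 1 := by
      intro v hv
      rw [List.countP_cons]
      simp [hp.1 v hv]
    simp only [List.map_cons, PySem.List.enumerate_cons, hh]
    refine congrArg₂ _ (by simp) ?_
    rw [List.map_congr_left (fun v hv => by rw [ht v hv]), ← ih (off + 1) hp.2]
    apply List.map_congr_left
    intro v hv
    simp only [Prod.mk.injEq, true_and]
    push_cast
    ring

-- B's inner list equals A's inner list (sorted, Nodup values)
lemma pv_inner_eq (vals : List String) (off : Int) (hnd : vals.Nodup) :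
    (PySem.List.sorted vals (fun v => v) false).map (fun v =>
        (v, off + (vals.countP (fun w => decide (w < v)) : Int)))
      = (PySem.List.enumerate (PySem.List.sorted vals (fun v => v) false) off).map (fun p => (p.2, p.1)) := by
  have hperm := PySem.List.sorted_perm vals (fun v => v) false
  have hnds : (PySem.List.sorted vals (fun v => v) false).Nodup := hperm.nodup_iff.2 hnd
  have hle : (PySem.List.sorted vals (fun v => v) false).Pairwise (· ≤ ·) := by
    simpa using PySem.List.sorted_pairwise vals (fun v => v)
  have hlt : (PySem.List.sorted vals (fun v => v) false).Pairwise (· < ·) :=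
    (hle.and hnds).imp (fun h => lt_of_le_of_ne h.1 h.2)
  rw [List.map_congr_left (fun v _ => by rw [← hperm.countP_eq]), pv_rank_enum _ off hlt]

-- the main fold correspondence: A's running offset equals B's rank base
lemma pv_main : ∀ (L : List (Int × String × List String)) (S : List ((Int × String) × Int))
    (acc : List (Int × String × List (String × Int))) (off : Int),
    L.Pairwise (fun a b => pvLtK (pvKeyOf a) (pvKeyOf b)) →
    (∀ t ∈ L, t.2.2.Nodup) →
    (∀ t ∈ L, ((S.filter (fun p => pvKeyLt p.1 (t.1, t.2.1))).map (fun p => p.2)).sum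
        = off + (((L.map (fun u => ((u.1, u.2.1), PySem.List.len u.2.2))).filter
            (fun p => pvKeyLt p.1 (t.1, t.2.1))).map (fun p => p.2)).sum) →
    (L.foldl
      (fun (st : List (Int × String × List (String × Int)) × Int) t =>
        (st.1 ++ [(t.1, t.2.1,
            (PySem.List.enumerate (PySem.List.sorted t.2.2 (fun v => v) false) st.2).map (fun p => (p.2, p.1)))],
         st.2 + PySem.List.len t.2.2))
      (acc, off)).1
    = L.foldl
      (fun res t =>
        res ++ [(t.1, t.2.1,
          (PySem.List.sorted t.2.2 (fun v => v) false).map (fun v =>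
            (v, ((S.filter (fun p => pvKeyLt p.1 (t.1, t.2.1))).map (fun p => p.2)).sum
                + (t.2.2.countP (fun w => decide (w < v)) : Int))))])
      acc := by
  intro L
  induction L with
  | nil => intro S acc off _ _ _; rfl
  | cons t ts ih =>
    intro S acc off hord hvals hbase
    rw [List.pairwise_cons] at hord
    -- the base of the head is exactly the offset
    have hself : pvKeyLt (t.1, t.2.1) (t.1, t.2.1) = false := by
      rw [Bool.eq_false_iff]
      intro h
      exact pvLtK_irrefl _ ((pvKeyLt_iff _ _).mp h)
    have hts : ∀ u ∈ ts, pvKeyLt (u.1, u.2.1) (t.1, t.2.1) = false := by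
      intro u hu
      rw [Bool.eq_false_iff]
      intro h
      exact pvLtK_asymm (hord.1 u hu) ((pvKeyLt_iff _ _).mp h)
    have hnilfilter : ((t :: ts).map (fun u => ((u.1, u.2.1), PySem.List.len u.2.2))).filter
        (fun p => pvKeyLt p.1 (t.1, t.2.1)) = [] := by
      rw [List.filter_eq_nil_iff]
      intro p hp
      rcases List.mem_map.mp hp with ⟨u, hu, rfl⟩
      rcases List.mem_cons.mp hu with rfl | hu
      · simp [hself]
      · simp [hts u hu]
    have hbase_t : ((S.filter (fun p => pvKeyLt p.1 (t.1, t.2.1))).map (fun p => p.2)).sum = off := by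
      have := hbase t (List.mem_cons_self ..)
      rw [hnilfilter] at this
      simpa using this
    -- the heads agree
    have hhead : (PySem.List.sorted t.2.2 (fun v => v) false).map (fun v =>
          (v, ((S.filter (fun p => pvKeyLt p.1 (t.1, t.2.1))).map (fun p => p.2)).sum
              + (t.2.2.countP (fun w => decide (w < v)) : Int)))
        = (PySem.List.enumerate (PySem.List.sorted t.2.2 (fun v => v) false) off).map (fun p => (p.2, p.1)) := by
      rw [hbase_t]
      exact pv_inner_eq t.2.2 off (hvals t (List.mem_cons_self ..))
    -- the hypothesis for the tail, at the advanced offset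
    have hbase' : ∀ u ∈ ts, ((S.filter (fun p => pvKeyLt p.1 (u.1, u.2.1))).map (fun p => p.2)).sum
        = (off + PySem.List.len t.2.2)
          + (((ts.map (fun u => ((u.1, u.2.1), PySem.List.len u.2.2))).filter
              (fun p => pvKeyLt p.1 (u.1, u.2.1))).map (fun p => p.2)).sum := by
      intro u hu
      have hcond : pvKeyLt (t.1, t.2.1) (u.1, u.2.1) = true := (pvKeyLt_iff _ _).mpr (hord.1 u hu)
      have := hbase u (List.mem_cons_of_mem _ hu)
      rw [List.map_cons, List.filter_cons] at this
      simp only [hcond, if_true, List.map_cons, List.sum_cons] at this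
      rw [this]
      ring
    rw [List.foldl_cons, List.foldl_cons, hhead]
    exact ih S (acc ++ [(t.1, t.2.1,
        (PySem.List.enumerate (PySem.List.sorted t.2.2 (fun v => v) false) off).map (fun p => (p.2, p.1)))])
      (off + PySem.List.len t.2.2) hord.2 (fun u hu => hvals u (List.mem_cons_of_mem _ hu)) hbase'

-- ===== VERDICT (by name: the statement is the Claim_ definition above) =====
theorem build_feature_to_index_map_py_spec : Claim_equal_build_feature_to_index_map_py := by
  intro fv _ hpre
  obtain ⟨hkeys, hvals⟩ := hpre
  unfold Spec_build_feature_to_index_map_py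
  unfold build_feature_to_index_map_py build_feature_to_index_map_py_alt
  simp only []
  set L := PySem.List.sorted2 fv (fun t => t.1) (fun t => t.2.1) false with hL
  have hperm : L.Perm fv := PySem.List.sorted2_perm fv _ _ false
  have hLkeys : (L.map (fun t => (t.1, t.2.1))).Nodup :=
    (hperm.map (fun t => (t.1, t.2.1))).nodup_iff.2 hkeys
  have hLvals : ∀ t ∈ L, t.2.2.Nodup := fun t ht => hvals t (hperm.mem_iff.1 ht)
  -- strict key order on L: pvLeK from the sort, strictness from key uniqueness
  have hle : L.Pairwise (fun a b => pvLeK (pvKeyOf a) (pvKeyOf b)) := pv_sorted2_pairwise fv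
  have hne : L.Pairwise (fun a b => pvKeyOf a ≠ pvKeyOf b) := by
    have := List.nodup_iff_pairwise_ne.mp hLkeys
    rw [List.pairwise_map] at this
    exact this.imp (fun h => h)
  have hlt : L.Pairwise (fun a b => pvLtK (pvKeyOf a) (pvKeyOf b)) :=
    (hle.and hne).imp (fun h => pvLtK_of_pvLeK_of_ne h.1 h.2)
  -- B's sizes list is a permutation of L's own size list
  have hbase : ∀ t ∈ L, (((fv.map (fun u => ((u.1, u.2.1), PySem.List.len u.2.2))).filter
        (fun p => pvKeyLt p.1 (t.1, t.2.1))).map (fun p => p.2)).sum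
      = (0 : Int) + (((L.map (fun u => ((u.1, u.2.1), PySem.List.len u.2.2))).filter
        (fun p => pvKeyLt p.1 (t.1, t.2.1))).map (fun p => p.2)).sum := by
    intro t _
    have hp : ((fv.map (fun u => ((u.1, u.2.1), PySem.List.len u.2.2))).filter
          (fun p => pvKeyLt p.1 (t.1, t.2.1))).Perm
        ((L.map (fun u => ((u.1, u.2.1), PySem.List.len u.2.2))).filter
          (fun p => pvKeyLt p.1 (t.1, t.2.1))) :=
      ((hperm.map (fun u => ((u.1, u.2.1), PySem.List.len u.2.2))).symm.filter _)
    rw [(hp.map (fun p => p.2)).sum_eq]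
    ring
  exact pv_main L (fv.map (fun u => ((u.1, u.2.1), PySem.List.len u.2.2))) [] 0 hlt hLvals hbase
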